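-- pv_equiv track=rewrite | github.com/fredporter/uDOS-dev | empire/message_pruner.py | _compress_thread_content
-- ===== SOURCE A (Python) =====
-- def _compress_thread_content(content: str, sender_name: str) -> str:
--     """Compress content to [Name:] format with quoted text removed.
--
--     Args:
--         content: Original message content
--         sender_name: Sender's name for prefix
--
--     Returns:
--         Compressed content
--     """
--     # Remove quoted text (lines starting with > or |)
--     lines = content.split('\n')
--     filtered_lines = []
--
--     for line in lines:
--         stripped = line.strip()
--
--         # Skip quoted lines
--         if stripped.startswith('>') or stripped.startswith('|'):
--             continue
--
--         # Skip signature markers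
--         if any(marker in line for marker in [
--             '---', '___', 'Sent from', 'Get Outlook',
--             'Sent via', 'Best regards', 'Kind regards',
--             'Sincerely', 'Thanks', 'Cheers', 'Regards'
--         ]):
--             break
--
--         # Skip empty lines
--         if not stripped:
--             continue
--
--         filtered_lines.append(stripped)
--
--     # Join with single spaces
--     text = ' '.join(filtered_lines)
--
--     # Truncate to 500 chars
--     if len(text) > 500:
--         text = text[:497] + '...'
--
--     # Format as [Name:] content
--     return f"[{sender_name}:] {text}"
-- ===== SOURCE B (Python) =====
-- _MARKERS = ['---', '___', 'Sent from', 'Get Outlook',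
--             'Sent via', 'Best regards', 'Kind regards',
--             'Sincerely', 'Thanks', 'Cheers', 'Regards']
--
--
-- def _is_quoted(line):
--     s = line.strip()
--     return s.startswith('>') or s.startswith('|')
--
--
-- def _has_marker(line):
--     return any(m in line for m in _MARKERS)
--
--
-- def _compress_thread_content(content: str, sender_name: str) -> str:
--     lines = content.split('\n')
--     # index of the first line that stops the scan (unquoted line with a marker)
--     stop = next((i for i, ln in enumerate(lines)
--                  if not _is_quoted(ln) and _has_marker(ln)), len(lines))
--     parts = [ln.strip() for ln in lines[:stop]
--              if not _is_quoted(ln) and ln.strip()]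
--     text = ' '.join(parts)
--     if len(text) > 500:
--         text = text[:497] + '...'
--     return f"[{sender_name}:] {text}"
-- ===== Notes on version B (the rewrite author's own statement) =====
-- stated objective: alternative
-- what changed: Replaces A's single accumulating loop with break by a two-phase decomposition: first compute the cut index of the first unquoted marker line with next(enumerate(...)), then a comprehension over the sliced prefix keeps stripped non-quoted non-empty lines.
import Mathlib
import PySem

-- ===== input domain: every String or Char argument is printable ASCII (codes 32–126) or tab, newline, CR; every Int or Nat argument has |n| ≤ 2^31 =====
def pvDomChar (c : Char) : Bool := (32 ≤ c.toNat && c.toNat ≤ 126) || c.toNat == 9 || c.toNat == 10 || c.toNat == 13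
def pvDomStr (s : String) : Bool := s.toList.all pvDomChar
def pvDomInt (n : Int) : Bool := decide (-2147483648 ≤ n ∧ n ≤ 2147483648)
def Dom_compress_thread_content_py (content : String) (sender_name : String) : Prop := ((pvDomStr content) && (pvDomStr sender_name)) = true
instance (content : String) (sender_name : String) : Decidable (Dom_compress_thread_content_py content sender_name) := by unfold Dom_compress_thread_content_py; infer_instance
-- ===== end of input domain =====

-- B replaces A's single accumulating loop-with-break by a two-phase decomposition:
-- find the cut index of the first unquoted marker line, then filter the sliced prefix.

-- ===== PORT A =====
-- the for-loop of A, with break = returning the accumulated list so far ([] then appended)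
def pvLoopA : List (List Char) → List (List Char)
  | [] => []
  | line :: rest =>
    let stripped := PySem.Chars.strip line
    if PySem.Chars.startswith stripped ['>'] || PySem.Chars.startswith stripped ['|'] then
      pvLoopA rest
    else if ([ "---".toList, "___".toList, "Sent from".toList, "Get Outlook".toList,
               "Sent via".toList, "Best regards".toList, "Kind regards".toList,
               "Sincerely".toList, "Thanks".toList, "Cheers".toList, "Regards".toList
             ].any (fun m => PySem.Chars.isIn m line)) then
      []
    else if stripped = [] then
      pvLoopA rest
    else
      stripped :: pvLoopA rest

def compress_thread_content_py (content : String) (sender_name : String) : String :=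
  let lines := PySem.Chars.splitOn content.toList ['\n']
  let filtered_lines := pvLoopA lines
  let text := PySem.Chars.join [' '] filtered_lines
  let text := if 500 < text.length then PySem.List.slice text none (some 497) ++ "...".toList else text
  String.ofList ("[".toList ++ sender_name.toList ++ ":] ".toList ++ text)

-- ===== PORT B =====
def pvMarkersB : List (List Char) :=
  [ "---".toList, "___".toList, "Sent from".toList, "Get Outlook".toList,
    "Sent via".toList, "Best regards".toList, "Kind regards".toList,
    "Sincerely".toList, "Thanks".toList, "Cheers".toList, "Regards".toList ]

def pvIsQuotedB (line : List Char) : Bool :=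
  let s := PySem.Chars.strip line
  PySem.Chars.startswith s ['>'] || PySem.Chars.startswith s ['|']

def pvHasMarkerB (line : List Char) : Bool :=
  pvMarkersB.any (fun m => PySem.Chars.isIn m line)

def compress_thread_content_py_alt (content : String) (sender_name : String) : String :=
  let lines := PySem.Chars.splitOn content.toList ['\n']
  let stop : Nat := (lines.findIdx? (fun ln => !pvIsQuotedB ln && pvHasMarkerB ln)).getD lines.length
  let parts := (PySem.List.slice lines none (some (stop : Int))).filterMap
      (fun ln => let s := PySem.Chars.strip ln
                 if !pvIsQuotedB ln && s ≠ [] then some s else none)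
  let text := PySem.Chars.join [' '] parts
  let text := if 500 < text.length then PySem.List.slice text none (some 497) ++ "...".toList else text
  String.ofList ("[".toList ++ sender_name.toList ++ ":] ".toList ++ text)

-- ===== PRECONDITION & SPEC =====
def Spec_compress_thread_content_py (content : String) (sender_name : String) (out : String) : Prop := out = compress_thread_content_py_alt content sender_name
instance (content : String) (sender_name : String) (out : String) : Decidable (Spec_compress_thread_content_py content sender_name out) := by unfold Spec_compress_thread_content_py; infer_instance

-- ===== CLAIM (what is proved, stated in full; the proofs are below) =====
def Claim_equal_compress_thread_content_py : Prop := ∀ (content : String) (sender_name : String), Dom_compress_thread_content_py content sender_name → Spec_compress_thread_content_py content sender_name (compress_thread_content_py content sender_name)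

-- ===== LEMMAS AND PROOFS =====

-- A's inline branches restated with B's named predicates
theorem pvLoopA_unfold (line : List Char) (rest : List (List Char)) :
    pvLoopA (line :: rest) =
      if pvIsQuotedB line then pvLoopA rest
      else if pvHasMarkerB line then []
      else if PySem.Chars.strip line = [] then pvLoopA rest
      else PySem.Chars.strip line :: pvLoopA rest := by
  simp only [pvLoopA, pvIsQuotedB, pvHasMarkerB, pvMarkersB]
  rfl

-- A's loop equals B's cut-then-filter on any line list
theorem pvLoopA_eq (ls : List (List Char)) :
    pvLoopA ls =
      (ls.take ((ls.findIdx? (fun ln => !pvIsQuotedB ln && pvHasMarkerB ln)).getD ls.length)).filterMap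
        (fun ln => let s := PySem.Chars.strip ln
                   if !pvIsQuotedB ln && s ≠ [] then some s else none) := by
  have hgd : ∀ (o : Option Nat) (n : Nat), (o.map (· + 1)).getD (n + 1) = o.getD n + 1 := by
    intro o n; cases o <;> rfl
  induction ls with
  | nil => simp [pvLoopA]
  | cons line rest ih =>
    rw [pvLoopA_unfold, List.findIdx?_cons]
    by_cases hq : pvIsQuotedB line
    · simp [hq, hgd, ih]
    · by_cases hm : pvHasMarkerB line
      · simp [hq, hm]
      · by_cases he : PySem.Chars.strip line = []
        · simp [hq, hm, he, hgd, ih]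
        · simp [hq, hm, he, hgd, ih]

-- ===== VERDICT (by name: the statement is the Claim_ definition above) =====
theorem compress_thread_content_py_spec : Claim_equal_compress_thread_content_py := by
  intro content sender_name _
  unfold Spec_compress_thread_content_py
  unfold compress_thread_content_py compress_thread_content_py_alt
  simp only [PySem.List.slice_to_natCast]
  rw [pvLoopA_eq]
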